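-- pv_equiv track=rewrite | github.com/mitoclub/PyMutSpec | scripts/pyvolve_process.py | codon_unmasking
-- ===== SOURCE A (Python) =====
-- from typing import Dict
--
-- def codon_unmasking(seq_common, codons, aln_dct: Dict[str, str]) -> Dict[str, str]:
--     """
--     Arguments
--     ---------
--     seq_common: str
--         root seq
--     codons: array
--         codon mask, 1-based
--     aln: List[str]
--         simulated sequences without masked codons
--     """
--     if len(seq_common) // 3 < max(codons):
--         raise ValueError("codon mask don't fit to sequence")
--
--     unmasked_codons = []
--     codons = set(codons)
--     aln = list(aln_dct.values())
--     n_aln = len(aln)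
--     codon_idx_in_common = 1
--     shift = 0
--     for i in range(0, len(seq_common), 3):
--         codon_basic = seq_common[i: i+3]
--         if len(codon_basic) != 3:
--             raise ValueError("Codon length != 3")
--
--         if codon_idx_in_common in codons:
--             aln_codons = [x[i - shift: i - shift + 3] for x in aln]
--             unmasked_codons.append(aln_codons)
--         else:
--             unmasked_codons.append([codon_basic for _ in range(n_aln)])
--             shift += 3
--         codon_idx_in_common += 1
--
--     seqs = ["".join([x[i] for x in unmasked_codons]) for i in range(len(unmasked_codons[0]))]
--     headers = list(aln_dct.keys())
--     unmasked_dct = dict(zip(headers, seqs))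
--     return unmasked_dct
-- ===== SOURCE B (Python) =====
-- def codon_unmasking(seq_common, codons, aln_dct):
--     if len(seq_common) // 3 < max(codons):
--         raise ValueError("codon mask don't fit to sequence")
--     mask = set(codons)
--     template = []  # per codon: int offset into aligned seq, or the root codon string
--     shift = 0
--     idx = 1
--     for i in range(0, len(seq_common), 3):
--         codon = seq_common[i:i + 3]
--         if len(codon) != 3:
--             raise ValueError("Codon length != 3")
--         if idx in mask:
--             template.append(i - shift)
--         else:
--             template.append(codon)
--             shift += 3
--         idx += 1
--     return {h: "".join(s[t:t + 3] if isinstance(t, int) else t for t in template)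
--             for h, s in aln_dct.items()}
-- ===== Notes on version B (the rewrite author's own statement) =====
-- stated objective: alternative
-- what changed: A builds a codon-major matrix (one row of codons per codon position, each row replicated across all sequences) and then transposes it by indexed column extraction and join; B makes one validation pass over seq_common building a per-codon template (root codon vs. source offset) and then builds each output sequence directly per (header, seq) pair, with no matrix and no transpose.
import Mathlib
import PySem

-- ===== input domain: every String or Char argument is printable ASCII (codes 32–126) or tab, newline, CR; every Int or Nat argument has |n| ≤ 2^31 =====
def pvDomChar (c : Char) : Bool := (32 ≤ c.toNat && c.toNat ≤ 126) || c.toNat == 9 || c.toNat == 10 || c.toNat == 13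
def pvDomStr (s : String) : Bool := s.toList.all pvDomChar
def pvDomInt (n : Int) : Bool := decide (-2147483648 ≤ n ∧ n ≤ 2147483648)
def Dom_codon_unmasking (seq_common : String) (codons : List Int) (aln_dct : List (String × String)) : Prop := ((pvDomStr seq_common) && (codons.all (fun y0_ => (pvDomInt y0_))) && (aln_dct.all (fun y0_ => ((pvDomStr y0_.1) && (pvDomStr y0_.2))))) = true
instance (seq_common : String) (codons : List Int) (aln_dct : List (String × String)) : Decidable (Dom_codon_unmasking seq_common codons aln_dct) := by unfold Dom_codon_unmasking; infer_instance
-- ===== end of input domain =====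

-- B replaces A's codon-major matrix + transpose with one validation pass building a per-codon template
-- (root codon vs source offset) and then a direct per-sequence build (objective: alternative decomposition).

-- ===== PORT A =====
-- loop body of A's `for i in range(0, len(seq_common), 3)`; state = (unmasked_codons, codon_idx_in_common, shift)
def pvStepA (seq_common : String) (codonsSet : PySem.Set Int) (aln : List String)
    (st : List (List String) × Int × Int) (i : Int) : List (List String) × Int × Int :=
  let codon_basic := PySem.Str.slice seq_common (some i) (some (i + 3))
  if PySem.Str.len codon_basic ≠ 3 then st  -- `raise ValueError("Codon length != 3")`: outside Pre_
  else if codonsSet.contains st.2.1 then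
    (st.1 ++ [aln.map (fun x => PySem.Str.slice x (some (i - st.2.2)) (some (i - st.2.2 + 3)))],
     st.2.1 + 1, st.2.2)
  else
    (st.1 ++ [(PySem.List.pyRange 0 (aln.length : Int) 1).map (fun _ => codon_basic)],
     st.2.1 + 1, st.2.2 + 3)

def codon_unmasking (seq_common : String) (codons : List Int) (aln_dct : List (String × String)) : List (String × String) :=
  match PySem.List.max? codons (fun x => x) with
  | none => []  -- `max(codons)` raises ValueError on an empty list: outside Pre_
  | some mx =>
    if PySem.Int.floordiv (PySem.Str.len seq_common) 3 < mx then []  -- `raise ValueError(...)`: outside Pre_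
    else
      let codonsSet := PySem.Set.ofList codons
      let aln := aln_dct.map (fun p => p.2)
      let st := (PySem.List.pyRange 0 (PySem.Str.len seq_common) 3).foldl
                  (pvStepA seq_common codonsSet aln) ([], 1, 0)
      let unmasked := st.1
      -- `seqs = ["".join([x[i] for x in unmasked_codons]) for i in range(len(unmasked_codons[0]))]`
      -- (`unmasked_codons[0]` raises IndexError on an empty sequence: outside Pre_, `.getD` default unreachable there)
      let seqs := (PySem.List.pyRange 0 ((((PySem.List.pyGet? unmasked 0).getD []).length : Int)) 1).map
                    (fun j => PySem.Str.join "" (unmasked.map (fun x => (PySem.List.pyGet? x j).getD "")))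
      let headers := aln_dct.map (fun p => p.1)
      ((headers.zip seqs).foldl (fun d p => d.insert p.1 p.2)
        (PySem.Dict.empty : PySem.Dict String String)).items

-- ===== PORT B =====
-- a template entry: `Sum.inl off` = take s[off:off+3] from the aligned sequence, `Sum.inr c` = reinsert root codon c
def pvRender1 (t : Int ⊕ String) (s : String) : String :=
  match t with
  | Sum.inl off => PySem.Str.slice s (some off) (some (off + 3))
  | Sum.inr c => c

-- B's validation/template pass; state = (template, idx, shift)
def pvStepB (seq_common : String) (mask : PySem.Set Int)
    (st : List (Int ⊕ String) × Int × Int) (i : Int) : List (Int ⊕ String) × Int × Int :=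
  let codon := PySem.Str.slice seq_common (some i) (some (i + 3))
  if PySem.Str.len codon ≠ 3 then st  -- `raise ValueError("Codon length != 3")`: outside Pre_
  else if mask.contains st.2.1 then (st.1 ++ [Sum.inl (i - st.2.2)], st.2.1 + 1, st.2.2)
  else (st.1 ++ [Sum.inr codon], st.2.1 + 1, st.2.2 + 3)

def codon_unmasking_alt (seq_common : String) (codons : List Int) (aln_dct : List (String × String)) : List (String × String) :=
  match PySem.List.max? codons (fun x => x) with
  | none => []  -- `max(codons)` raises ValueError on an empty list: outside Pre_
  | some mx =>
    if PySem.Int.floordiv (PySem.Str.len seq_common) 3 < mx then []  -- `raise ValueError(...)`: outside Pre_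
    else
      let mask := PySem.Set.ofList codons
      let tpl := ((PySem.List.pyRange 0 (PySem.Str.len seq_common) 3).foldl
                    (pvStepB seq_common mask) ([], 1, 0)).1
      aln_dct.map (fun p => (p.1, PySem.Str.join "" (tpl.map (fun t => pvRender1 t p.2))))

-- ===== PRECONDITION & SPEC =====
-- Pre_ = exactly the inputs where A returns: codons nonempty (max([]) raises), sequence nonempty
-- (unmasked_codons[0] raises IndexError) with length a multiple of 3 (else "Codon length != 3"),
-- mask fitting the sequence (else ValueError); Nodup keys only excludes assoc lists that do not
-- represent a Python dict (aln_dct is a dict in Python, so its keys are distinct by construction).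
def Pre_codon_unmasking (seq_common : String) (codons : List Int) (aln_dct : List (String × String)) : Prop :=
  codons ≠ [] ∧ seq_common.toList ≠ [] ∧ seq_common.toList.length % 3 = 0 ∧
  (∀ c ∈ codons, c ≤ (seq_common.toList.length : Int) / 3) ∧
  (aln_dct.map Prod.fst).Nodup
instance (seq_common : String) (codons : List Int) (aln_dct : List (String × String)) : Decidable (Pre_codon_unmasking seq_common codons aln_dct) := by unfold Pre_codon_unmasking; infer_instance

def pvWitness_codon_unmasking : String × List Int × (List (String × String)) :=
  ("ACGTTT", [1], [("h1", "acg"), ("h2", "ggg")])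

def Spec_codon_unmasking (seq_common : String) (codons : List Int) (aln_dct : List (String × String)) (out : List (String × String)) : Prop := out = codon_unmasking_alt seq_common codons aln_dct
instance (seq_common : String) (codons : List Int) (aln_dct : List (String × String)) (out : List (String × String)) : Decidable (Spec_codon_unmasking seq_common codons aln_dct out) := by unfold Spec_codon_unmasking; infer_instance

-- ===== CLAIM (what is proved, stated in full; the proofs are below) =====
def Claim_equal_codon_unmasking : Prop := ∀ (seq_common : String) (codons : List Int) (aln_dct : List (String × String)), Dom_codon_unmasking seq_common codons aln_dct → Pre_codon_unmasking seq_common codons aln_dct → Spec_codon_unmasking seq_common codons aln_dct (codon_unmasking seq_common codons aln_dct)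

-- ===== LEMMAS AND PROOFS =====

-- one row of A's matrix, as a function of B's template entry
def pvRow (aln : List String) (t : Int ⊕ String) : List String := aln.map (fun s => pvRender1 t s)

-- loop invariant: A's matrix is B's template mapped through pvRow; idx and shift coincide
theorem pv_inv (seq : String) (mask : PySem.Set Int) (aln : List String) :
    ∀ (l : List Int) (tpl : List (Int ⊕ String)) (idx shift : Int),
    l.foldl (pvStepA seq mask aln) (tpl.map (pvRow aln), idx, shift)
      = ((l.foldl (pvStepB seq mask) (tpl, idx, shift)).1.map (pvRow aln),
         (l.foldl (pvStepB seq mask) (tpl, idx, shift)).2) := by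
  intro l
  induction l with
  | nil => intro tpl idx shift; rfl
  | cons i l ih =>
    intro tpl idx shift
    simp only [List.foldl_cons]
    have hrep : (PySem.List.pyRange 0 (aln.length : Int) 1).map
        (fun _ => PySem.Str.slice seq (some i) (some (i + 3)))
        = aln.map (fun _ => PySem.Str.slice seq (some i) (some (i + 3))) := by
      simp only [List.map_const', PySem.List.length_pyRange_one, sub_zero, Int.toNat_natCast]
    by_cases h1 : PySem.Str.len (PySem.Str.slice seq (some i) (some (i + 3))) ≠ 3
    · simp only [pvStepA, pvStepB, if_pos h1]
      exact ih tpl idx shift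
    · by_cases h2 : mask.contains idx
      · simp only [pvStepA, pvStepB, if_neg h1, if_pos h2]
        have := ih (tpl ++ [Sum.inl (i - shift)]) (idx + 1) shift
        simpa [pvRow, pvRender1] using this
      · simp only [pvStepA, pvStepB, if_neg h1, if_neg h2]
        have := ih (tpl ++ [Sum.inr (PySem.Str.slice seq (some i) (some (i + 3)))]) (idx + 1) (shift + 3)
        simpa [pvRow, pvRender1, hrep] using this

-- the template pass only appends
theorem pv_len_mono (seq : String) (mask : PySem.Set Int) :
    ∀ (l : List Int) (st : List (Int ⊕ String) × Int × Int),
    st.1.length ≤ (l.foldl (pvStepB seq mask) st).1.length := by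
  intro l
  induction l with
  | nil => intro st; simp
  | cons i l ih =>
    intro st
    refine le_trans ?_ (ih (pvStepB seq mask st i))
    simp only [pvStepB]
    split_ifs <;> simp

theorem pv_foldl_ne_nil (seq : String) (mask : PySem.Set Int) (l : List Int)
    (st : List (Int ⊕ String) × Int × Int) (hst : st.1 ≠ []) :
    ((l.foldl (pvStepB seq mask) st).1 ≠ []) := by
  have := pv_len_mono seq mask l st
  intro hnil
  rw [hnil] at this
  simp only [List.length_nil, Nat.le_zero, List.length_eq_zero_iff] at this
  exact hst this

-- under Pre_ the template pass appends at least its first codon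
theorem pv_tpl_ne_nil (seq : String) (mask : PySem.Set Int)
    (h1 : seq.toList ≠ []) (h3 : seq.toList.length % 3 = 0) :
    ((PySem.List.pyRange 0 (PySem.Str.len seq) 3).foldl (pvStepB seq mask) ([], 1, 0)).1 ≠ [] := by
  have hL : 3 ≤ seq.toList.length := by
    have := List.length_pos_iff.mpr h1
    omega
  have hL' : 3 ≤ seq.length := by simpa using hL
  have hlen : PySem.Str.len seq = (seq.toList.length : Int) := PySem.Str.len_eq seq
  rw [hlen, PySem.List.pyRange_of_pos 0 (seq.toList.length : Int) (by norm_num)]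
  have hpos : (0:Int) < (seq.toList.length : Int) := by exact_mod_cast List.length_pos_iff.mpr h1
  rw [if_pos hpos]
  obtain ⟨m, hm⟩ : ∃ m, (((seq.toList.length : Int) - 0 + 3 - 1) / 3).toNat = m + 1 := by
    refine ⟨(((seq.toList.length : Int) - 0 + 3 - 1) / 3).toNat - 1, ?_⟩
    have : (1:Int) ≤ ((seq.toList.length : Int) - 0 + 3 - 1) / 3 := by
      apply Int.le_ediv_of_mul_le <;> omega
    omega
  rw [hm, List.range_succ_eq_map, List.map_cons, List.foldl_cons]
  apply pv_foldl_ne_nil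
  have hl3 : PySem.Str.len (PySem.Str.slice seq (some (0 + 3 * ((0:Nat):Int))) (some (0 + 3 * ((0:Nat):Int) + 3))) = 3 := by
    norm_num
    rw [show ((3:Int)) = ((3:Nat):Int) by norm_num, PySem.List.slice_to_natCast]
    simp only [List.length_take]
    omega
  simp only [pvStepB, hl3]
  norm_num
  split_ifs <;> simp

theorem pv_zip_map (l : List (String × String)) (g : String → String) :
    (l.map (fun p => p.1)).zip ((l.map (fun p => p.2)).map g)
      = l.map (fun p => (p.1, g p.2)) := by
  induction l with
  | nil => rfl
  | cons p l ih => simp only [List.map_cons, List.zip_cons_cons, ih]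

-- column j of A's matrix is B's template rendered against the j-th aligned sequence
theorem pv_col (aln : List String) (tpl : List (Int ⊕ String)) (j : Int)
    (h0 : 0 ≤ j) (h1 : j < (aln.length : Int)) :
    (tpl.map (pvRow aln)).map (fun x => (PySem.List.pyGet? x j).getD "")
      = tpl.map (fun t => pvRender1 t (PySem.List.pyGetD aln j "")) := by
  rw [List.map_map]
  apply List.map_congr_left
  intro t _
  have hj : j.toNat < aln.length := by omega
  simp only [Function.comp, pvRow]
  rw [PySem.List.pyGet?_of_nonneg _ h0, PySem.List.pyGetD_eq_getElem aln "" h0 h1]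
  simp [List.getElem?_map, List.getElem?_eq_getElem hj]

theorem pv_floordiv (seq : String) :
    PySem.Int.floordiv (PySem.Str.len seq) 3 = (seq.toList.length : Int) / 3 := by
  rw [PySem.Str.len_eq]
  show ((seq.toList.length : Int)).fdiv 3 = _
  rw [Int.fdiv_eq_ediv_of_nonneg]
  positivity

-- per-column length of A's matrix rows
theorem pv_row_length (aln : List String) (t : Int ⊕ String) : (pvRow aln t).length = aln.length := by
  simp [pvRow]

-- ===== VERDICT (by name: the statement is the Claim_ definition above) =====
theorem codon_unmasking_spec : Claim_equal_codon_unmasking := by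
  intro seq codons aln_dct _ hpre
  obtain ⟨hc, h1, h3, hmax, hnd⟩ := hpre
  unfold Spec_codon_unmasking
  obtain ⟨mx, hmx⟩ : ∃ mx, PySem.List.max? codons (fun x => x) = some mx := by
    cases h : PySem.List.max? codons (fun x => x) with
    | none => exact absurd ((PySem.List.max?_eq_none_iff _ _).mp h) hc
    | some m => exact ⟨m, rfl⟩
  have hguard : ¬ (PySem.Int.floordiv (PySem.Str.len seq) 3 < mx) := by
    have hle := hmax mx (PySem.List.max?_mem hmx)
    rw [pv_floordiv]
    omega
  simp only [codon_unmasking, codon_unmasking_alt, hmx, if_neg hguard]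
  have hinv := pv_inv seq (PySem.Set.ofList codons) (aln_dct.map (fun p => p.2))
    (PySem.List.pyRange 0 (PySem.Str.len seq) 3) [] 1 0
  simp only [List.map_nil] at hinv
  rw [hinv]
  set T := ((PySem.List.pyRange 0 (PySem.Str.len seq) 3).foldl
      (pvStepB seq (PySem.Set.ofList codons)) ([], 1, 0)).1 with hTdef
  have hT : T ≠ [] := by rw [hTdef]; exact pv_tpl_ne_nil seq _ h1 h3
  have hlen0 : ((PySem.List.pyGet? (List.map (pvRow (aln_dct.map (fun p => p.2))) T) 0).getD []).length
      = (aln_dct.map (fun p => p.2)).length := by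
    obtain ⟨t0, tl, ht⟩ := List.exists_cons_of_ne_nil hT
    rw [ht, List.map_cons, PySem.List.pyGet?_zero_cons, Option.getD_some, pv_row_length]
  rw [hlen0]
  have hseqs : (PySem.List.pyRange 0 ((aln_dct.map (fun p => p.2)).length : Int) 1).map
        (fun j => PySem.Str.join "" ((List.map (pvRow (aln_dct.map (fun p => p.2))) T).map
          (fun x => (PySem.List.pyGet? x j).getD "")))
      = (aln_dct.map (fun p => p.2)).map
          (fun s => PySem.Str.join "" (T.map (fun t => pvRender1 t s))) := by
    calc (PySem.List.pyRange 0 ((aln_dct.map (fun p => p.2)).length : Int) 1).map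
          (fun j => PySem.Str.join "" ((List.map (pvRow (aln_dct.map (fun p => p.2))) T).map
            (fun x => (PySem.List.pyGet? x j).getD "")))
        = (PySem.List.pyRange 0 ((aln_dct.map (fun p => p.2)).length : Int) 1).map
            (fun j => PySem.Str.join "" (T.map (fun t => pvRender1 t
              (PySem.List.pyGetD (aln_dct.map (fun p => p.2)) j "")))) := by
          apply List.map_congr_left
          intro j hj
          have hjr := PySem.List.mem_pyRange_one.mp hj
          rw [pv_col _ T j hjr.1 hjr.2]
      _ = ((PySem.List.pyRange 0 ((aln_dct.map (fun p => p.2)).length : Int) 1).map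
            (fun j => PySem.List.pyGetD (aln_dct.map (fun p => p.2)) j "")).map
            (fun s => PySem.Str.join "" (T.map (fun t => pvRender1 t s))) := by
          rw [List.map_map]
          rfl
      _ = (aln_dct.map (fun p => p.2)).map
            (fun s => PySem.Str.join "" (T.map (fun t => pvRender1 t s))) := by
          rw [PySem.List.map_pyGetD_pyRange_zero']
  rw [hseqs, pv_zip_map]
  rw [PySem.Dict.items_foldl_insert_fresh
        (aln_dct.map (fun p => (p.1, PySem.Str.join "" (T.map (fun t => pvRender1 t p.2)))))
        (fun p => p.1) (fun p => p.2) PySem.Dict.empty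
        (fun a _ => by simp [PySem.Dict.empty])
        (by simpa [List.map_map] using hnd)]
  simp [PySem.Dict.empty]
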